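-- pv_equiv track=rewrite | github.com/Ar-Sohaib/Chernobyl_Dispersion_MonteCarlo | visualization.py | _get_wind_phase
-- ===== SOURCE A (Python) =====
-- def _get_wind_phase(t_hours):
--     phases = [
--         (0,   48,  "N-NW → Scandinavie"),
--         (48,  96,  "W → Pologne, Baltique"),
--         (96,  168, "S-SW → Ukraine, Roumanie"),
--         (168, 264, "W → Europe centrale"),
--         (264, 480, "Dispersion large"),
--     ]
--     for t0, t1, name in phases:
--         if t0 <= t_hours < t1:
--             return name
--     return "Dispersion large"
-- ===== SOURCE B (Python) =====
-- import bisect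
--
-- _BOUNDS = [0, 48, 96, 168, 264, 480]
-- _NAMES = [
--     "Dispersion large",
--     "N-NW → Scandinavie",
--     "W → Pologne, Baltique",
--     "S-SW → Ukraine, Roumanie",
--     "W → Europe centrale",
--     "Dispersion large",
--     "Dispersion large",
-- ]
--
-- def _get_wind_phase(t_hours):
--     return _NAMES[bisect.bisect_right(_BOUNDS, t_hours)]
-- ===== Notes on version B (the rewrite author's own statement) =====
-- stated objective: idiomatic
-- what changed: Replaced the linear scan over (start,end,name) interval triples with a sorted boundary array and bisect_right lookup into a name table, with no per-interval branching.
import Mathlib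
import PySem

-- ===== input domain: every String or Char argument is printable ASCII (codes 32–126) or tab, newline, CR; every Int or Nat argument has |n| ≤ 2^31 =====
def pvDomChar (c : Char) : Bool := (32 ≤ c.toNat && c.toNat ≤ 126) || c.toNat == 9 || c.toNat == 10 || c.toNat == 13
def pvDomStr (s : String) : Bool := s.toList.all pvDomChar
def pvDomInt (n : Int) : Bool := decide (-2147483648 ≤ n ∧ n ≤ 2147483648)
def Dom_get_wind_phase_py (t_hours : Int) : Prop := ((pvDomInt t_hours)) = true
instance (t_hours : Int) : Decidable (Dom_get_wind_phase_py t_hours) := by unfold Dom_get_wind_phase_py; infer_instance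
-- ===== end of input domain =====

-- B replaces A's linear interval scan by a bisect_right lookup in a sorted boundary array (idiomatic).
-- ===== PORT A =====
def pvPhasesA : List (Int × Int × String) :=
  [(0, 48, "N-NW → Scandinavie"),
   (48, 96, "W → Pologne, Baltique"),
   (96, 168, "S-SW → Ukraine, Roumanie"),
   (168, 264, "W → Europe centrale"),
   (264, 480, "Dispersion large")]

def pvScanA : List (Int × Int × String) → Int → String
  | [], _ => "Dispersion large"
  | (t0, t1, name) :: rest, t => if t0 ≤ t ∧ t < t1 then name else pvScanA rest t

def get_wind_phase_py (t_hours : Int) : String := pvScanA pvPhasesA t_hours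

-- ===== PORT B =====
def pvBoundsB : List Int := [0, 48, 96, 168, 264, 480]

def pvNamesB : List String :=
  ["Dispersion large",
   "N-NW → Scandinavie",
   "W → Pologne, Baltique",
   "S-SW → Ukraine, Roumanie",
   "W → Europe centrale",
   "Dispersion large",
   "Dispersion large"]

-- bisect.bisect_right on a sorted list = number of elements ≤ t
def get_wind_phase_py_alt (t_hours : Int) : String :=
  pvNamesB.getD (pvBoundsB.countP (fun b => decide (b ≤ t_hours))) "Dispersion large"

-- ===== PRECONDITION & SPEC =====
def Spec_get_wind_phase_py (t_hours : Int) (out : String) : Prop := out = get_wind_phase_py_alt t_hours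
instance (t_hours : Int) (out : String) : Decidable (Spec_get_wind_phase_py t_hours out) := by unfold Spec_get_wind_phase_py; infer_instance

-- ===== CLAIM (what is proved, stated in full; the proofs are below) =====
def Claim_equal_get_wind_phase_py : Prop := ∀ (t_hours : Int), Dom_get_wind_phase_py t_hours → Spec_get_wind_phase_py t_hours (get_wind_phase_py t_hours)

-- ===== LEMMAS AND PROOFS =====

-- ===== VERDICT (by name: the statement is the Claim_ definition above) =====
theorem get_wind_phase_py_spec : Claim_equal_get_wind_phase_py := by
  intro t _
  unfold Spec_get_wind_phase_py get_wind_phase_py get_wind_phase_py_alt pvPhasesA pvBoundsB pvNamesB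
  simp only [pvScanA, List.countP, List.countP.go]
  split_ifs with h1 h2 h3 h4 h5
  · rw [decide_eq_true (by omega : (0:Int) ≤ t),
        decide_eq_false (by omega : ¬ (48:Int) ≤ t),
        decide_eq_false (by omega : ¬ (96:Int) ≤ t),
        decide_eq_false (by omega : ¬ (168:Int) ≤ t),
        decide_eq_false (by omega : ¬ (264:Int) ≤ t),
        decide_eq_false (by omega : ¬ (480:Int) ≤ t)]
    rfl
  · rw [decide_eq_true (by omega : (0:Int) ≤ t),
        decide_eq_true (by omega : (48:Int) ≤ t),
        decide_eq_false (by omega : ¬ (96:Int) ≤ t),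
        decide_eq_false (by omega : ¬ (168:Int) ≤ t),
        decide_eq_false (by omega : ¬ (264:Int) ≤ t),
        decide_eq_false (by omega : ¬ (480:Int) ≤ t)]
    rfl
  · rw [decide_eq_true (by omega : (0:Int) ≤ t),
        decide_eq_true (by omega : (48:Int) ≤ t),
        decide_eq_true (by omega : (96:Int) ≤ t),
        decide_eq_false (by omega : ¬ (168:Int) ≤ t),
        decide_eq_false (by omega : ¬ (264:Int) ≤ t),
        decide_eq_false (by omega : ¬ (480:Int) ≤ t)]
    rfl
  · rw [decide_eq_true (by omega : (0:Int) ≤ t),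
        decide_eq_true (by omega : (48:Int) ≤ t),
        decide_eq_true (by omega : (96:Int) ≤ t),
        decide_eq_true (by omega : (168:Int) ≤ t),
        decide_eq_false (by omega : ¬ (264:Int) ≤ t),
        decide_eq_false (by omega : ¬ (480:Int) ≤ t)]
    rfl
  · rw [decide_eq_true (by omega : (0:Int) ≤ t),
        decide_eq_true (by omega : (48:Int) ≤ t),
        decide_eq_true (by omega : (96:Int) ≤ t),
        decide_eq_true (by omega : (168:Int) ≤ t),
        decide_eq_true (by omega : (264:Int) ≤ t),
        decide_eq_false (by omega : ¬ (480:Int) ≤ t)]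
    rfl
  · -- fallback region: t < 0 or t ≥ 480
    rcases lt_or_ge t 0 with hlt | hge
    · rw [decide_eq_false (by omega : ¬ (0:Int) ≤ t),
          decide_eq_false (by omega : ¬ (48:Int) ≤ t),
          decide_eq_false (by omega : ¬ (96:Int) ≤ t),
          decide_eq_false (by omega : ¬ (168:Int) ≤ t),
          decide_eq_false (by omega : ¬ (264:Int) ≤ t),
          decide_eq_false (by omega : ¬ (480:Int) ≤ t)]
      rfl
    · rw [decide_eq_true (by omega : (0:Int) ≤ t),
          decide_eq_true (by omega : (48:Int) ≤ t),
          decide_eq_true (by omega : (96:Int) ≤ t),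
          decide_eq_true (by omega : (168:Int) ≤ t),
          decide_eq_true (by omega : (264:Int) ≤ t),
          decide_eq_true (by omega : (480:Int) ≤ t)]
      rfl
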